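-- pv_equiv track=rewrite | github.com/RinaPiggy/predict-then-cluster-meal-delivery | Clustering_Alg/CCHC.py | get_inner_neighbors
-- ===== SOURCE A (Python) =====
-- def get_inner_neighbors(num_zones, cluster_list):
--     # cluster_list: [zone ji] for all zones i belong to cluster j
--     inner_neighbors = {}
--     for i in range(num_zones):
--         for cluster in cluster_list:
--             if i in cluster:
--                 inner_neighbors[i] = cluster.copy()
--                 inner_neighbors[i].remove(i)
--     return inner_neighbors
-- ===== SOURCE B (Python) =====
-- def get_inner_neighbors(num_zones, cluster_list):
--     # Single pass over the clusters: each member zone gets its cluster minus itself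
--     # (later clusters overwrite, matching last-match semantics); keys emitted in
--     # ascending order.
--     result = {}
--     for cluster in cluster_list:
--         for z in dict.fromkeys(cluster):  # distinct members, one removal each
--             if 0 <= z < num_zones:
--                 rest = cluster.copy()
--                 rest.remove(z)
--                 result[z] = rest
--     return dict(sorted(result.items()))
-- ===== Notes on version B (the rewrite author's own statement) =====
-- stated objective: faster
-- what changed: Instead of scanning every cluster for every zone in range(num_zones), B makes a single pass over the clusters, assigning each member zone its cluster minus itself (later clusters overwrite, reproducing A's last-match rule), and emits the keys in ascending order to match A's dict insertion order.
import Mathlib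
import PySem

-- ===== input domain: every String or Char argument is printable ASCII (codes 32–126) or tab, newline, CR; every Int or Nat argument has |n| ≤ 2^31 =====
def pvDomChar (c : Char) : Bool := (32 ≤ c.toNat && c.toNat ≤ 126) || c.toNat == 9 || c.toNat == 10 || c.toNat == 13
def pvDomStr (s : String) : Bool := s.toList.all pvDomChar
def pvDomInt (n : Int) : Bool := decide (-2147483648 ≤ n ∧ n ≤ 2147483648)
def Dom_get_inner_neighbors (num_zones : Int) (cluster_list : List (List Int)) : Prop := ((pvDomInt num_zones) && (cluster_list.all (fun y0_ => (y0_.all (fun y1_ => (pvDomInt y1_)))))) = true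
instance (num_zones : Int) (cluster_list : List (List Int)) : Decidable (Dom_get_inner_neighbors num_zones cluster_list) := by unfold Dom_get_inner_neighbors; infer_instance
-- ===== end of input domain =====

-- B replaces A's per-zone rescan of all clusters (O(num_zones * total size)) by a single
-- pass over the clusters building the dict once, then emitting the keys in ascending order.

-- cluster.copy(); copy.remove(i): Python's list.remove drops the FIRST occurrence; the
-- membership guard in both programs makes remove? a 'some', so getD never takes its default.
def pvRm (c : List Int) (i : Int) : List Int := (PySem.List.remove? c i).getD c

-- ===== PORT A =====
def get_inner_neighbors (num_zones : Int) (cluster_list : List (List Int)) : List (Int × List Int) :=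
  ((PySem.List.pyRange 0 num_zones 1).foldl
    (fun d i =>
      cluster_list.foldl
        (fun d cluster => if i ∈ cluster then d.insert i (pvRm cluster i) else d) d)
    PySem.Dict.empty).items

-- ===== PORT B =====
def get_inner_neighbors_alt (num_zones : Int) (cluster_list : List (List Int)) : List (Int × List Int) :=
  PySem.List.sorted
    ((cluster_list.foldl
        (fun d cluster =>
          (PySem.List.dedup cluster).foldl
            (fun d z =>
              if 0 ≤ z ∧ z < num_zones then d.insert z (pvRm cluster z) else d) d)
        PySem.Dict.empty).items)
    (fun p => p.1)

-- ===== PRECONDITION & SPEC =====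
def Spec_get_inner_neighbors (num_zones : Int) (cluster_list : List (List Int)) (out : List (Int × List Int)) : Prop := out = get_inner_neighbors_alt num_zones cluster_list
instance (num_zones : Int) (cluster_list : List (List Int)) (out : List (Int × List Int)) : Decidable (Spec_get_inner_neighbors num_zones cluster_list out) := by unfold Spec_get_inner_neighbors; infer_instance

-- ===== CLAIM (what is proved, stated in full; the proofs are below) =====
def Claim_equal_get_inner_neighbors : Prop := ∀ (num_zones : Int) (cluster_list : List (List Int)), Dom_get_inner_neighbors num_zones cluster_list → Spec_get_inner_neighbors num_zones cluster_list (get_inner_neighbors num_zones cluster_list)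

-- ===== LEMMAS AND PROOFS =====

-- the value zone i ends up with: its LAST cluster (both programs let later clusters win), minus i
def pvLast (cluster_list : List (List Int)) (i : Int) : Option (List Int) :=
  cluster_list.foldl (fun a c => if i ∈ c then some (pvRm c i) else a) none

lemma pvLast_fold_or (i : Int) (cs : List (List Int)) (a : Option (List Int)) :
    cs.foldl (fun a c => if i ∈ c then some (pvRm c i) else a) a = (pvLast cs i).or a := by
  induction cs generalizing a with
  | nil => simp [pvLast]
  | cons c cs ih =>
    have h2 := ih (a := if i ∈ c then some (pvRm c i) else none)
    simp only [pvLast, List.foldl_cons] at *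
    rw [ih, h2, Option.or_assoc]
    by_cases h : i ∈ c <;> simp [h]

lemma pvLast_cons (i : Int) (c : List Int) (cs : List (List Int)) :
    pvLast (c :: cs) i = (pvLast cs i).or (if i ∈ c then some (pvRm c i) else none) := by
  have := pvLast_fold_or i cs (if i ∈ c then some (pvRm c i) else none)
  simp only [pvLast, List.foldl_cons] at *
  exact this

-- A's inner loop once i is already bound: later matching clusters just overwrite
lemma innerA_insert (i : Int) (cs : List (List Int)) :
    ∀ (d : PySem.Dict Int (List Int)) (v : List Int),
      cs.foldl (fun d c => if i ∈ c then d.insert i (pvRm c i) else d) (d.insert i v)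
        = d.insert i ((pvLast cs i).getD v) := by
  induction cs with
  | nil => intro d v; simp [pvLast]
  | cons c cs ih =>
    intro d v
    simp only [List.foldl_cons, pvLast_cons]
    by_cases h : i ∈ c
    · rw [if_pos h, PySem.Dict.insert_insert_self, ih]
      cases pvLast cs i <;> simp [h]
    · rw [if_neg h, ih]
      cases pvLast cs i <;> simp [h]

-- A's inner loop from scratch is a single conditional insert of the last matching cluster
lemma innerA_top (i : Int) (cs : List (List Int)) (d : PySem.Dict Int (List Int)) :
    cs.foldl (fun d c => if i ∈ c then d.insert i (pvRm c i) else d) d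
      = (pvLast cs i).elim d (fun v => d.insert i v) := by
  induction cs generalizing d with
  | nil => simp [pvLast]
  | cons c cs ih =>
    simp only [List.foldl_cons, pvLast_cons]
    by_cases h : i ∈ c
    · rw [if_pos h, innerA_insert]
      cases pvLast cs i <;> simp [h]
    · rw [if_neg h, ih]
      cases pvLast cs i <;> simp [h]

-- A's outer loop over fresh, distinct keys appends one item per bound zone, in key order
lemma outerA_items (cluster_list : List (List Int)) (ks : List Int) :
    ∀ (d : PySem.Dict Int (List Int)), ks.Nodup → (∀ k ∈ ks, d.contains k = false) →
      (ks.foldl (fun d i =>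
          cluster_list.foldl (fun d c => if i ∈ c then d.insert i (pvRm c i) else d) d) d).items
        = d.items ++ ks.filterMap (fun i => (pvLast cluster_list i).map (fun v => (i, v))) := by
  induction ks with
  | nil => intro d _ _; simp
  | cons k ks ih =>
    intro d hnd hfresh
    simp only [List.foldl_cons, List.filterMap_cons]
    rw [innerA_top]
    cases hv : pvLast cluster_list k with
    | none =>
      simp only [Option.elim_none, Option.map_none]
      rw [ih d hnd.of_cons (fun k' hk' => hfresh k' (List.mem_cons_of_mem _ hk'))]
    | some v =>
      simp only [Option.elim_some, Option.map_some]
      rw [ih (d.insert k v) hnd.of_cons, PySem.Dict.items_insert_of_not_contains d v (hfresh k List.mem_cons_self), List.append_assoc, List.singleton_append]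
      intro k' hk'
      rw [PySem.Dict.contains_insert]
      have hne : k' ≠ k := fun h => (List.nodup_cons.mp hnd).1 (h ▸ hk')
      simp [hne, hfresh k' (List.mem_cons_of_mem _ hk')]

-- B's inner loop: lookups after processing one cluster
lemma innerB_fold_get? (num_zones : Int) (c : List Int) (j : Int) (l : List Int) :
    ∀ (d : PySem.Dict Int (List Int)),
      (l.foldl (fun d z => if 0 ≤ z ∧ z < num_zones then d.insert z (pvRm c z) else d) d).get? j
        = if (0 ≤ j ∧ j < num_zones) ∧ j ∈ l then some (pvRm c j) else d.get? j := by
  induction l with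
  | nil => intro d; simp
  | cons z l ih =>
    intro d
    simp only [List.foldl_cons, ih]
    by_cases hjl : (0 ≤ j ∧ j < num_zones) ∧ j ∈ l
    · simp [hjl]
    · rw [if_neg hjl]
      by_cases hzj : z = j
      · subst hzj
        by_cases hP : 0 ≤ z ∧ z < num_zones
        · simp [hP]
        · simp [hP]
      · by_cases hP : 0 ≤ z ∧ z < num_zones
        · rw [if_pos hP, PySem.Dict.get?_insert_of_ne _ _ (fun h => hzj h.symm)]
          simp only [List.mem_cons]
          rw [if_neg (by tauto)]
        · rw [if_neg hP]
          simp only [List.mem_cons]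
          rw [if_neg (by tauto)]

-- B's whole dict-building pass: lookups at the end
lemma dB_get? (num_zones : Int) (j : Int) (cl : List (List Int)) :
    ∀ (d : PySem.Dict Int (List Int)),
      (cl.foldl (fun d c =>
          (PySem.List.dedup c).foldl
            (fun d z => if 0 ≤ z ∧ z < num_zones then d.insert z (pvRm c z) else d) d) d).get? j
        = (if 0 ≤ j ∧ j < num_zones then pvLast cl j else none).or (d.get? j) := by
  induction cl with
  | nil => intro d; by_cases h : 0 ≤ j ∧ j < num_zones <;> simp [pvLast, h]
  | cons c cs ih =>
    intro d
    simp only [List.foldl_cons, ih, innerB_fold_get?, PySem.List.mem_dedup, pvLast_cons]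
    by_cases hP : 0 ≤ j ∧ j < num_zones
    · simp only [hP, if_true, true_and]
      by_cases hc : j ∈ c <;> cases pvLast cs j <;> simp [hc]
    · simp [hP]

-- B's dict keys stay distinct
lemma dB_nodup_keys (num_zones : Int) (cl : List (List Int)) :
    ∀ (d : PySem.Dict Int (List Int)), d.keys.Nodup →
      (cl.foldl (fun d c =>
          (PySem.List.dedup c).foldl
            (fun d z => if 0 ≤ z ∧ z < num_zones then d.insert z (pvRm c z) else d) d) d).keys.Nodup := by
  induction cl with
  | nil => intro d h; simpa
  | cons c cs ih =>
    intro d h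
    simp only [List.foldl_cons]
    apply ih
    rw [PySem.List.foldl_ite_eq_foldl_filter (fun z : Int => 0 ≤ z ∧ z < num_zones)
        (fun (d : PySem.Dict Int (List Int)) (z : Int) => d.insert z (pvRm c z)) (PySem.List.dedup c) d]
    exact PySem.Dict.nodup_keys_foldl_insert _ (fun _ z => pvRm c z) _ h

-- the zone range, as a strictly increasing list
lemma pyRange_zero_eq (n : Int) :
    PySem.List.pyRange 0 n = List.map (fun k : Nat => (k : Int)) (List.range n.toNat) := by
  by_cases h : 0 ≤ n
  · rw [show n = ((n.toNat : Nat) : Int) by omega]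
    exact PySem.List.pyRange_zero_natCast n.toNat
  · rw [show n.toNat = 0 by omega]
    simp only [List.range_zero, List.map_nil]
    rw [List.eq_nil_iff_forall_not_mem]
    intro x hx
    have := PySem.List.mem_pyRange_one.mp hx
    omega

lemma pyRange_zero_pairwise (n : Int) :
    (PySem.List.pyRange 0 n).Pairwise (· < ·) := by
  rw [pyRange_zero_eq]
  refine List.Pairwise.map _ (fun a b h => by exact_mod_cast h) ?_
  exact List.pairwise_lt_range

-- ===== VERDICT (by name: the statement is the Claim_ definition above) =====
theorem get_inner_neighbors_spec : Claim_equal_get_inner_neighbors := by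
  intro n cl _
  unfold Spec_get_inner_neighbors get_inner_neighbors get_inner_neighbors_alt
  set L : List (Int × List Int) :=
    (PySem.List.pyRange 0 n 1).filterMap (fun i => (pvLast cl i).map (fun v => (i, v))) with hL
  have hA : ((PySem.List.pyRange 0 n 1).foldl
      (fun d i => cl.foldl (fun d c => if i ∈ c then d.insert i (pvRm c i) else d) d)
      PySem.Dict.empty).items = L := by
    rw [outerA_items cl _ PySem.Dict.empty]
    · rw [hL, show (PySem.Dict.empty : PySem.Dict Int (List Int)).items = [] from rfl, List.nil_append]
    · have := pyRange_zero_pairwise n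
      exact this.imp (fun h => ne_of_lt h)
    · intro k _; simp
  rw [hA]
  -- B's dict
  set dB := cl.foldl (fun d c =>
      (PySem.List.dedup c).foldl
        (fun d z => if 0 ≤ z ∧ z < n then d.insert z (pvRm c z) else d) d)
      (PySem.Dict.empty : PySem.Dict Int (List Int)) with hdB
  have hnodupKeys : dB.keys.Nodup := dB_nodup_keys n cl PySem.Dict.empty (by simp)
  have hget : ∀ j, dB.get? j = if 0 ≤ j ∧ j < n then pvLast cl j else none := by
    intro j
    rw [hdB, dB_get? n j cl PySem.Dict.empty]
    simp
  -- Pairwise on L's keys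
  have hpwL : L.Pairwise (fun p q => p.1 < q.1) := by
    rw [hL]
    rw [List.pairwise_filterMap]
    refine (pyRange_zero_pairwise n).imp ?_
    intro a b hab p hp q hq
    cases ha : pvLast cl a <;> rw [ha] at hp <;> cases hb : pvLast cl b <;> rw [hb] at hq
    · simp at hp
    · simp at hp
    · simp at hq
    · simp only [Option.map_some, Option.some.injEq] at hp hq
      rw [← hp, ← hq]; exact hab
  have hnodupL : L.Nodup := hpwL.imp (fun h => by
    intro he; rw [he] at h; exact lt_irrefl _ h)
  have hnodupItems : dB.items.Nodup := by
    have : dB.items.map (·.1) = dB.keys := rfl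
    exact List.Nodup.of_map (·.1) (this ▸ hnodupKeys)
  have hmemL : ∀ p : Int × List Int, p ∈ L ↔ (0 ≤ p.1 ∧ p.1 < n) ∧ pvLast cl p.1 = some p.2 := by
    intro p
    rw [hL, List.mem_filterMap]
    constructor
    · rintro ⟨a, ha, hfa⟩
      cases hv : pvLast cl a <;> rw [hv] at hfa
      · simp at hfa
      · simp only [Option.map_some, Option.some.injEq] at hfa
        subst hfa
        exact ⟨by simpa using PySem.List.mem_pyRange_one.mp ha, hv⟩
    · rintro ⟨hrange, hv⟩
      exact ⟨p.1, PySem.List.mem_pyRange_one.mpr (by simpa using hrange), by simp [hv]⟩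
  have hperm : L.Perm dB.items := by
    rw [List.perm_ext_iff_of_nodup hnodupL hnodupItems]
    intro p
    rw [hmemL p, ← PySem.Dict.get?_eq_some_iff_mem_items dB p.1 p.2 hnodupKeys, hget p.1]
    by_cases h : 0 ≤ p.1 ∧ p.1 < n <;> simp [h]
  rw [PySem.List.sorted_eq_of_perm_of_pairwise_lt dB.items L (fun p => p.1) hperm hpwL]
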